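-- pv_equiv track=rewrite | github.com/JayeshMD/Nand2Tetris | 08/vmcompiler_impl/vmcompiler.py | get_assem_call
-- ===== SOURCE A (Python) =====
-- def get_assem_call(line_elements, call_count):
--
--     # Get return address
--     # Copy all memory segment pointers
--     # Jump to foo
--
--     # Find ARG for callee and store in R13
--     assem  = '@SP'+ '\n'
--     assem += 'D=M'+ '\n'
--     assem += '@'+line_elements[2]+ '\n'
--     assem += 'D=D-A'+ '\n'
--     assem += '@R13'+ '\n'
--     assem += 'M=D'+ '\n'
--
--     # Push return address
--     assem += '@'+line_elements[1]+'_return_'+str(call_count)+ '\n'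
--     assem += 'D=A'+ '\n'
--     assem += '@SP'+ '\n'
--     assem += 'AM=M+1'+ '\n'
--     assem += 'A=A-1'+ '\n'
--     assem += 'M=D'+ '\n'
--
--     for mem_ptr in ['LCL','ARG','THIS','THAT']:
--         assem += '@'+ mem_ptr+ '\n'
--         assem += 'D=M'+ '\n'
--         assem += '@SP'+ '\n'
--         assem += 'AM=M+1'+ '\n'
--         assem += 'A=A-1'+ '\n'
--         assem += 'M=D'+ '\n'
--
--     # Copy ARG value for calle from R13 into ARG
--     assem += '@R13'+ '\n'
--     assem += 'D=M'+ '\n'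
--     assem += '@ARG'+ '\n'
--     assem += 'M=D'+ '\n'
--
--     #assem += '@SP'+ '\n'
--     #assem += 'AM=M+1'+ '\n'
--     assem += '@'+line_elements[1]+ '\n'
--     assem += '0;JMP'+ '\n'
--     assem += '('+line_elements[1]+'_return_'+str(call_count)+')'+ '\n'
--
--     call_count +=1
--
--     return assem, call_count
-- ===== SOURCE B (Python) =====
-- # Template-substitution reimplementation: the call sequence is a fixed assembly
-- # template with three placeholders filled in one formatting step (no incremental
-- # concatenation and no loop over segment pointers).
-- _CALL_TEMPLATE = (
--     '@SP\nD=M\n@{n}\nD=D-A\n@R13\nM=D\n'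
--     '@{ret}\nD=A\n@SP\nAM=M+1\nA=A-1\nM=D\n'
--     '@LCL\nD=M\n@SP\nAM=M+1\nA=A-1\nM=D\n'
--     '@ARG\nD=M\n@SP\nAM=M+1\nA=A-1\nM=D\n'
--     '@THIS\nD=M\n@SP\nAM=M+1\nA=A-1\nM=D\n'
--     '@THAT\nD=M\n@SP\nAM=M+1\nA=A-1\nM=D\n'
--     '@R13\nD=M\n@ARG\nM=D\n'
--     '@{fn}\n0;JMP\n({ret})\n'
-- )
--
-- def get_assem_call(line_elements, call_count):
--     fn = line_elements[1]
--     ret = fn + '_return_' + str(call_count)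
--     assem = _CALL_TEMPLATE.format(n=line_elements[2], ret=ret, fn=fn)
--     return assem, call_count + 1
-- ===== Notes on version B (the rewrite author's own statement) =====
-- stated objective: alternative
-- what changed: Replaces A's incremental += string building with its separate 4-pointer loop by a single fixed assembly template containing {n}/{ret}/{fn} placeholders, filled in one str.format substitution pass.
import Mathlib
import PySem

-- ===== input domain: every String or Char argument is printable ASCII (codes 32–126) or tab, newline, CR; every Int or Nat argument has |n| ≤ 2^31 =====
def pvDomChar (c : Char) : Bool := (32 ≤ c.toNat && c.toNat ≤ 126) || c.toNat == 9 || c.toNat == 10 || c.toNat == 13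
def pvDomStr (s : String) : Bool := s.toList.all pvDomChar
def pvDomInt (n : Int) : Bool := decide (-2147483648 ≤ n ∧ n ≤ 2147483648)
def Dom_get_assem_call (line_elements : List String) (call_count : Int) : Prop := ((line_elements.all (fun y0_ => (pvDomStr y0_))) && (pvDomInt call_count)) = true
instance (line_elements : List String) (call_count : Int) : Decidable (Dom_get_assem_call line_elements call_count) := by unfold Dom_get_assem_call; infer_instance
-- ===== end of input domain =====

-- B replaces A's incremental += concatenations and 4-pointer loop by one fixed assembly
-- template filled in a single str.format substitution pass (objective: alternative decomposition).


-- ===== PORT A =====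
def get_assem_call (line_elements : List String) (call_count : Int) : String × Int :=
  let assem := "@SP" ++ "\n"
  let assem := assem ++ "D=M" ++ "\n"
  let assem := assem ++ "@" ++ PySem.List.pyGetD line_elements 2 "" ++ "\n"
  let assem := assem ++ "D=D-A" ++ "\n"
  let assem := assem ++ "@R13" ++ "\n"
  let assem := assem ++ "M=D" ++ "\n"
  let assem := assem ++ "@" ++ PySem.List.pyGetD line_elements 1 "" ++ "_return_" ++ PySem.Int.toStr call_count ++ "\n"
  let assem := assem ++ "D=A" ++ "\n"
  let assem := assem ++ "@SP" ++ "\n"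
  let assem := assem ++ "AM=M+1" ++ "\n"
  let assem := assem ++ "A=A-1" ++ "\n"
  let assem := assem ++ "M=D" ++ "\n"
  let assem := (["LCL", "ARG", "THIS", "THAT"]).foldl (fun a mem_ptr =>
    a ++ "@" ++ mem_ptr ++ "\n" ++ "D=M" ++ "\n" ++ "@SP" ++ "\n" ++ "AM=M+1" ++ "\n"
      ++ "A=A-1" ++ "\n" ++ "M=D" ++ "\n") assem
  let assem := assem ++ "@R13" ++ "\n"
  let assem := assem ++ "D=M" ++ "\n"
  let assem := assem ++ "@ARG" ++ "\n"
  let assem := assem ++ "M=D" ++ "\n"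
  let assem := assem ++ "@" ++ PySem.List.pyGetD line_elements 1 "" ++ "\n"
  let assem := assem ++ "0;JMP" ++ "\n"
  let assem := assem ++ "(" ++ PySem.List.pyGetD line_elements 1 "" ++ "_return_" ++ PySem.Int.toStr call_count ++ ")" ++ "\n"
  (assem, call_count + 1)

-- ===== PORT B =====
-- Hand port of str.format for the restricted template language B uses: plain text plus
-- '{name}' fields, no '{{'/'}}' escapes, no format specs, every field name present in env.
-- Exact for Python's str.format on exactly these templates/environments.
def pvFmtGo (cs : List Char) (field : Option (List Char)) (env : List (String × String)) : List Char :=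
  match cs, field with
  | [], _ => []
  | c :: cs, none => if c = '{' then pvFmtGo cs (some []) env else c :: pvFmtGo cs none env
  | c :: cs, some acc =>
      if c = '}' then ((env.lookup (String.ofList acc.reverse)).getD "").toList ++ pvFmtGo cs none env
      else pvFmtGo cs (some (c :: acc)) env

def pvFormat (tpl : String) (env : List (String × String)) : String :=
  String.ofList (pvFmtGo tpl.toList none env)

def pvCallTemplate : String :=
  "@SP\nD=M\n@{n}\nD=D-A\n@R13\nM=D\n" ++
  "@{ret}\nD=A\n@SP\nAM=M+1\nA=A-1\nM=D\n" ++
  "@LCL\nD=M\n@SP\nAM=M+1\nA=A-1\nM=D\n" ++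
  "@ARG\nD=M\n@SP\nAM=M+1\nA=A-1\nM=D\n" ++
  "@THIS\nD=M\n@SP\nAM=M+1\nA=A-1\nM=D\n" ++
  "@THAT\nD=M\n@SP\nAM=M+1\nA=A-1\nM=D\n" ++
  "@R13\nD=M\n@ARG\nM=D\n" ++
  "@{fn}\n0;JMP\n({ret})\n"

def get_assem_call_alt (line_elements : List String) (call_count : Int) : String × Int :=
  let fn := PySem.List.pyGetD line_elements 1 ""
  let ret := fn ++ "_return_" ++ PySem.Int.toStr call_count
  let assem := pvFormat pvCallTemplate [("n", PySem.List.pyGetD line_elements 2 ""), ("ret", ret), ("fn", fn)]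
  (assem, call_count + 1)

-- ===== PRECONDITION & SPEC =====
-- Pre_ excludes exactly the inputs where Python A raises IndexError (line_elements[1] / line_elements[2]).
def Pre_get_assem_call (line_elements : List String) (call_count : Int) : Prop := 3 ≤ line_elements.length
instance (line_elements : List String) (call_count : Int) : Decidable (Pre_get_assem_call line_elements call_count) := by unfold Pre_get_assem_call; infer_instance
def pvWitness_get_assem_call : List String × Int := (["call", "Foo.bar", "2"], 0)

def Spec_get_assem_call (line_elements : List String) (call_count : Int) (out : String × Int) : Prop := out = get_assem_call_alt line_elements call_count
instance (line_elements : List String) (call_count : Int) (out : String × Int) : Decidable (Spec_get_assem_call line_elements call_count out) := by unfold Spec_get_assem_call; infer_instance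

-- ===== CLAIM (what is proved, stated in full; the proofs are below) =====
def Claim_equal_get_assem_call : Prop := ∀ (line_elements : List String) (call_count : Int), Dom_get_assem_call line_elements call_count → Pre_get_assem_call line_elements call_count → Spec_get_assem_call line_elements call_count (get_assem_call line_elements call_count)

-- ===== LEMMAS AND PROOFS =====
set_option maxRecDepth 100000 in
lemma pvFormat_call (n r f : String) :
    pvFormat pvCallTemplate [("n", n), ("ret", r), ("fn", f)] =
      "@SP\nD=M\n@" ++ n ++ "\nD=D-A\n@R13\nM=D\n@" ++ r ++
      "\nD=A\n@SP\nAM=M+1\nA=A-1\nM=D\n" ++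
      "@LCL\nD=M\n@SP\nAM=M+1\nA=A-1\nM=D\n" ++
      "@ARG\nD=M\n@SP\nAM=M+1\nA=A-1\nM=D\n" ++
      "@THIS\nD=M\n@SP\nAM=M+1\nA=A-1\nM=D\n" ++
      "@THAT\nD=M\n@SP\nAM=M+1\nA=A-1\nM=D\n" ++
      "@R13\nD=M\n@ARG\nM=D\n@" ++ f ++ "\n0;JMP\n(" ++ r ++ ")\n" := by
  refine String.ext ?_
  simp [pvFormat, pvCallTemplate, pvFmtGo, List.lookup]

-- ===== VERDICT (by name: the statement is the Claim_ definition above) =====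
set_option maxRecDepth 8192 in
theorem get_assem_call_spec : Claim_equal_get_assem_call := by
  intro les cc _ _
  show _ = _
  simp only [get_assem_call, get_assem_call_alt, List.foldl, pvFormat_call, Prod.mk.injEq]
  refine ⟨?_, trivial⟩
  refine String.ext ?_
  simp [String.toList_append, List.append_assoc]
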